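-- pv_equiv track=rewrite | github.com/code-cp/leetcode | solutions/6094/main.py | distinctNames
-- ===== SOURCE A (Python) =====
-- from typing import List
--
-- from collections import defaultdict
--
-- def distinctNames(ideas: List[str]) -> int:
--     group = defaultdict(int)
--     for s in ideas:
--         group[s[1:]] |= 1 << (ord(s[0]) - ord('a'))
--     ans = 0
--     # 定义 \textit{cnt}[i][j]cnt[i][j] 表示组中首字母不包含 ii 但包含 jj 的组的个数。枚举每个组，统计 \textit{cnt}cnt，
--     # 同时枚举该组的首字母 ii 和不在该组的首字母 jj，答案即为 \textit{cnt}[i][j]cnt[i][j] 的累加值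
--     cnt = [[0] * 26 for _ in range(26)]
--     for mask in group.values():
--         for i in range(26):
--             if mask >> i & 1 == 0:
--                 for j in range(26):
--                     if mask >> j & 1:
--                         cnt[i][j] += 1
--             else:
--                 for j in range(26):
--                     if mask >> j & 1 == 0:
--                         ans += cnt[i][j]
--     return ans * 2
-- ===== SOURCE B (Python) =====
-- def distinctNames(ideas):
--     group = {}
--     for s in ideas:
--         key = s[1:]
--         group[key] = group.get(key, 0) | (1 << (ord(s[0]) - 97))
--     masks = list(group.values())
--     ans = 0
--     for i in range(26):
--         for j in range(26):
--             x = sum(1 for m in masks if m >> i & 1 and not m >> j & 1)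
--             y = sum(1 for m in masks if m >> j & 1 and not m >> i & 1)
--             ans += x * y
--     return ans
-- ===== Notes on version B (the rewrite author's own statement) =====
-- stated objective: alternative
-- what changed: B replaces A's streaming 26x26 cnt-table pass over suffix groups (with interleaved count/accumulate branches and a final *2) by a direct count per ordered letter pair (i,j): it counts suffix groups containing i but not j and groups containing j but not i and sums the products over the full letter grid.
import Mathlib
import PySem

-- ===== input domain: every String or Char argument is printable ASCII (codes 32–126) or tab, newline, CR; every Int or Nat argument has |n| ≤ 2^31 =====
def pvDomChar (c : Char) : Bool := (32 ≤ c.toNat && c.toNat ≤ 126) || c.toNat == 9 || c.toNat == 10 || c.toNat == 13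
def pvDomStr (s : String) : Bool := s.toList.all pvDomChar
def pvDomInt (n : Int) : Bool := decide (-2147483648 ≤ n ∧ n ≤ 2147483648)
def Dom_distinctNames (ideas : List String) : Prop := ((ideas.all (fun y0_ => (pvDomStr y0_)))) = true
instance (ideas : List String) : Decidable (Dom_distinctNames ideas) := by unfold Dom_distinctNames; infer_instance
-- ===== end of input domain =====

-- B counts, for each ordered letter pair, the suffix groups containing one letter but not the
-- other and sums the products, instead of A's streaming 26x26 cnt-table pass; objective: alternative.


-- ===== PORT A =====
-- group[s[1:]] |= 1 << (ord(s[0]) - 97); s[0]/s[1:] as headI/drop 1 — exact for nonempty s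
-- (Pre_ guarantees it); ord(s[0]) - 97 as Nat subtraction — exact for s[0] ≥ 'a' (Pre_ guarantees it).
def pvGroupA (ideas : List String) : PySem.Dict String Nat :=
  ideas.foldl (fun d s =>
    PySem.Dict.insert d (String.ofList (s.toList.drop 1))
      ((PySem.Dict.getD d (String.ofList (s.toList.drop 1)) 0) ||| ((1 : Nat) <<< (s.toList.headI.toNat - 97)))) PySem.Dict.empty

-- the body of A's `for i in range(26)` loop; cnt is the 26x26 table, kept as a curried function,
-- cnt[i][j] += 1 as a pointwise functional update ('mask >> j & 1' truthiness = == 1, its value is 0 or 1)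
def pvStepA (mask : Nat) (st : Int × (Nat → Nat → Nat)) (i : Nat) : Int × (Nat → Nat → Nat) :=
  if (mask >>> i) &&& 1 == 0 then
    (st.1, (List.range 26).foldl (fun cnt j =>
        if (mask >>> j) &&& 1 == 1 then
          (fun a b => if a = i ∧ b = j then cnt a b + 1 else cnt a b)
        else cnt) st.2)
  else
    ((List.range 26).foldl (fun acc j =>
        if (mask >>> j) &&& 1 == 0 then acc + (st.2 i j : Int) else acc) st.1, st.2)

-- A's `for mask in group.values()` loop and the final `return ans * 2`
def pvACount (masks : List Nat) : Int :=
  (masks.foldl (fun st mask => (List.range 26).foldl (pvStepA mask) st)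
    ((0 : Int), fun _ _ => (0 : Nat))).1 * 2

def distinctNames (ideas : List String) : Int :=
  pvACount (PySem.Dict.values (pvGroupA ideas))

-- ===== PORT B =====
-- Source B builds the same suffix→mask dict (dict.get default instead of defaultdict; same Lean form)
def pvGroupB (ideas : List String) : PySem.Dict String Nat :=
  ideas.foldl (fun d s =>
    PySem.Dict.insert d (String.ofList (s.toList.drop 1))
      ((PySem.Dict.getD d (String.ofList (s.toList.drop 1)) 0) ||| ((1 : Nat) <<< (s.toList.headI.toNat - 97)))) PySem.Dict.empty

-- Source B's double loop over letter pairs; sum(1 for m in masks if m>>i&1 and not m>>j&1) = filter + length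
def pvBCount (masks : List Nat) : Int :=
  (List.range 26).foldl (fun ans i =>
    (List.range 26).foldl (fun ans j =>
      ans + (((masks.filter (fun m => ((m >>> i) &&& 1 == 1) && ((m >>> j) &&& 1 == 0))).length : Int))
          * (((masks.filter (fun m => ((m >>> j) &&& 1 == 1) && ((m >>> i) &&& 1 == 0))).length : Int))) ans) 0

def distinctNames_alt (ideas : List String) : Int :=
  pvBCount (PySem.Dict.values (pvGroupB ideas))

-- ===== PRECONDITION & SPEC =====
-- Pre_ excludes exactly the inputs where the Python A raises: an empty idea (s[0] IndexError) or a
-- first character below 'a' (negative shift count, ValueError). On every other input A returns.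
def Pre_distinctNames (ideas : List String) : Prop :=
  ∀ s ∈ ideas, s.toList ≠ [] ∧ 97 ≤ s.toList.headI.toNat
instance (ideas : List String) : Decidable (Pre_distinctNames ideas) := by
  unfold Pre_distinctNames; infer_instance

def pvWitness_distinctNames : List String := ["coffee", "donuts", "time", "toffee"]

def Spec_distinctNames (ideas : List String) (out : Int) : Prop := out = distinctNames_alt ideas
instance (ideas : List String) (out : Int) : Decidable (Spec_distinctNames ideas out) := by unfold Spec_distinctNames; infer_instance

-- ===== CLAIM (what is proved, stated in full; the proofs are below) =====
def Claim_equal_distinctNames : Prop := ∀ (ideas : List String), Dom_distinctNames ideas → Pre_distinctNames ideas → Spec_distinctNames ideas (distinctNames ideas)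

-- ===== LEMMAS AND PROOFS =====

-- pc M i j = number of masks in M with bit i set and bit j clear (B's x/y counts)
def pvPC (M : List Nat) (i j : Nat) : Nat :=
  (M.filter (fun m => ((m >>> i) &&& 1 == 1) && ((m >>> j) &&& 1 == 0))).length

-- cnt-table value A maintains: masks with bit i clear and bit j set
def pvCnt (M : List Nat) (i j : Nat) : Nat :=
  (M.filter (fun m => ((m >>> i) &&& 1 == 0) && ((m >>> j) &&& 1 == 1))).length

-- B's total as a Finset sum
def pvS (M : List Nat) : Int :=
  ∑ i ∈ Finset.range 26, ∑ j ∈ Finset.range 26, (pvPC M i j : Int) * (pvPC M j i : Int)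

-- indicator: mask m has bit i set and bit j clear
def pvE (m i j : Nat) : Nat :=
  if ((m >>> i) &&& 1 == 1) && ((m >>> j) &&& 1 == 0) then 1 else 0

-- row sum A's else-branch adds for a first letter i present in mask m
def pvRow (m : Nat) (cnt : Nat → Nat → Nat) (i : Nat) : Int :=
  ∑ j ∈ Finset.range 26, (if (m >>> j) &&& 1 = 0 then (cnt i j : Int) else 0)

lemma pv_bit01 (m i : Nat) : (m >>> i) &&& 1 = 0 ∨ (m >>> i) &&& 1 = 1 := by
  have : (m >>> i) &&& 1 = (m >>> i) % 2 := Nat.and_one_is_mod _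
  omega


lemma pv_sum_map_range (f : Nat → Int) (n : Nat) :
    ((List.range n).map f).sum = ∑ i ∈ Finset.range n, f i := by
  induction n with
  | zero => simp
  | succ n ih => simp [List.range_succ, Finset.sum_range_succ, ih]

lemma pv_foldl_if_add (c : Nat → Bool) (f : Nat → Int) :
    ∀ (l : List Nat) (s : Int),
      l.foldl (fun a j => if c j then a + f j else a) s
        = s + (l.map (fun j => if c j then f j else 0)).sum := by
  intro l
  induction l with
  | nil => simp
  | cons x t ih =>
    intro s
    by_cases h : c x <;> simp [h, ih] <;> ring

lemma pv_jfold (m i : Nat) :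
    ∀ (js : List Nat), js.Nodup → ∀ (cnt : Nat → Nat → Nat) (a b : Nat),
      (js.foldl (fun cnt j =>
          if (m >>> j) &&& 1 == 1 then
            (fun a b => if a = i ∧ b = j then cnt a b + 1 else cnt a b)
          else cnt) cnt) a b
        = cnt a b + (if a = i ∧ b ∈ js ∧ (m >>> b) &&& 1 = 1 then 1 else 0) := by
  intro js
  induction js with
  | nil => simp
  | cons j t ih =>
    intro hnd cnt a b
    have hjt : j ∉ t := (List.nodup_cons.mp hnd).1
    have hnd' : t.Nodup := (List.nodup_cons.mp hnd).2
    simp only [List.foldl_cons]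
    rw [ih hnd']
    have hstep : (if ((m >>> j) &&& 1 == 1 : Bool) then
          (fun a b => if a = i ∧ b = j then cnt a b + 1 else cnt a b) else cnt) a b
        = cnt a b + (if a = i ∧ b = j ∧ (m >>> j) &&& 1 = 1 then 1 else 0) := by
      by_cases hb : (m >>> j) &&& 1 = 1
      · by_cases hab : a = i ∧ b = j
        · simp [hb, hab.1, hab.2]
        · simp [hb, hab]
      · have hb2 : m >>> j % 2 = 0 := by
          have := Nat.and_one_is_mod (m >>> j); omega
        have hb' : (((m >>> j) &&& 1 == 1) : Bool) = false := by
          simp [Nat.and_one_is_mod, hb2]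
        simp [hb', Nat.and_one_is_mod, hb2]
    rw [hstep]
    by_cases hai : a = i <;> by_cases hbj : b = j <;> by_cases hbt : b ∈ t <;>
      simp_all <;> omega

lemma pv_ifold (m : Nat) :
    ∀ (is : List Nat), is.Nodup → ∀ (ans : Int) (cnt : Nat → Nat → Nat),
      (is.foldl (pvStepA m) (ans, cnt)).1
          = ans + (is.map (fun i => if (m >>> i) &&& 1 = 1 then pvRow m cnt i else 0)).sum
        ∧ ∀ a b, (is.foldl (pvStepA m) (ans, cnt)).2 a b
          = cnt a b + (if a ∈ is ∧ (m >>> a) &&& 1 = 0 ∧ b < 26 ∧ (m >>> b) &&& 1 = 1 then 1 else 0) := by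
  intro is
  induction is with
  | nil => intro _ ans cnt; exact ⟨by simp, by simp⟩
  | cons i t ih =>
    intro hnd ans cnt
    have hit : i ∉ t := (List.nodup_cons.mp hnd).1
    have hnd' : t.Nodup := (List.nodup_cons.mp hnd).2
    simp only [List.foldl_cons]
    by_cases hb : (m >>> i) &&& 1 = 0
    · have hbE : (((m >>> i) &&& 1 == 0) : Bool) = true := by simp [hb]
      have hstep : pvStepA m (ans, cnt) i
          = (ans, (List.range 26).foldl (fun cnt j =>
              if (m >>> j) &&& 1 == 1 then
                (fun a b => if a = i ∧ b = j then cnt a b + 1 else cnt a b)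
              else cnt) cnt) := by
        unfold pvStepA
        rw [if_pos hbE]
      rw [hstep]
      set cnt1 := (List.range 26).foldl (fun cnt j =>
          if (m >>> j) &&& 1 == 1 then
            (fun a b => if a = i ∧ b = j then cnt a b + 1 else cnt a b)
          else cnt) cnt with hc1
      have hcnt1 : ∀ a b, cnt1 a b
          = cnt a b + (if a = i ∧ b < 26 ∧ (m >>> b) &&& 1 = 1 then 1 else 0) := by
        intro a b
        rw [hc1, pv_jfold m i (List.range 26) (List.nodup_range) cnt a b]
        congr 1
        simp [List.mem_range]
      obtain ⟨ih1, ih2⟩ := ih hnd' ans cnt1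
      constructor
      · rw [ih1]
        have hmap : t.map (fun i' => if (m >>> i') &&& 1 = 1 then pvRow m cnt1 i' else 0)
                  = t.map (fun i' => if (m >>> i') &&& 1 = 1 then pvRow m cnt i' else 0) := by
          apply List.map_congr_left
          intro x _
          by_cases hbx : (m >>> x) &&& 1 = 1
          · have hxi : x ≠ i := by intro h; rw [h] at hbx; omega
            simp only [hbx, if_pos]
            unfold pvRow
            apply Finset.sum_congr rfl
            intro j _
            rw [hcnt1 x j]
            simp [hxi]
          · have h0 : ¬ m >>> x % 2 = 1 := by
              have := Nat.and_one_is_mod (m >>> x); omega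
            simp [Nat.and_one_is_mod, h0]
        rw [hmap]
        simp [List.map_cons]
        intro h
        exact absurd h (by have := Nat.and_one_is_mod (m >>> i); omega)
      · intro a b
        rw [ih2 a b, hcnt1 a b]
        by_cases hai : a = i <;> by_cases hat : a ∈ t <;> by_cases hbb : b < 26 ∧ (m >>> b) &&& 1 = 1 <;>
          simp_all [List.mem_cons] <;> omega
    · have hb1 : (m >>> i) &&& 1 = 1 := by
        rcases pv_bit01 m i with h | h
        · exact absurd h hb
        · exact h
      have hstep : pvStepA m (ans, cnt) i = (ans + pvRow m cnt i, cnt) := by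
        unfold pvStepA
        rw [if_neg (by rw [hb1]; simp)]
        rw [pv_foldl_if_add (fun j => ((m >>> j) &&& 1 == 0)) (fun j => (cnt i j : Int)),
            pv_sum_map_range]
        unfold pvRow
        have hite : ∀ j : Nat, (if (((m >>> j) &&& 1 == 0) : Bool) then (cnt i j : Int) else 0)
            = (if (m >>> j) &&& 1 = 0 then (cnt i j : Int) else 0) := by
          intro j
          by_cases hj : (m >>> j) &&& 1 = 0 <;> simp [hj]
        simp only [hite]
      rw [hstep]
      obtain ⟨ih1, ih2⟩ := ih hnd' (ans + pvRow m cnt i) cnt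
      constructor
      · rw [ih1]
        have h2 : m >>> i % 2 = 1 := by have := Nat.and_one_is_mod (m >>> i); omega
        simp [Nat.and_one_is_mod, h2]
        ring
      · intro a b
        rw [ih2 a b]
        congr 1
        by_cases hai : a = i
        · have h2 : ¬ m >>> a % 2 = 0 := by
            have := Nat.and_one_is_mod (m >>> a); rw [hai] at *; omega
          simp [Nat.and_one_is_mod, h2]
        · simp [Nat.and_one_is_mod, hai, List.mem_cons]

lemma pvPC_append (P : List Nat) (m i j : Nat) :
    pvPC (P ++ [m]) i j = pvPC P i j + pvE m i j := by
  unfold pvPC pvE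
  rw [List.filter_append, List.length_append, List.filter_singleton]
  by_cases h : (((m >>> i) &&& 1 == 1) && ((m >>> j) &&& 1 == 0) : Bool) <;>
    simp_all [Nat.and_one_is_mod]
  rcases Nat.mod_two_eq_zero_or_one (m >>> i) with h1 | h1 <;> simp [h1, h]

lemma pvCnt_eq_pc (M : List Nat) (i j : Nat) : pvCnt M i j = pvPC M j i := by
  unfold pvCnt pvPC
  congr 1
  apply List.filter_congr
  intro m _
  rw [Bool.and_comm]

lemma pvE_mul_swap (m i j : Nat) : pvE m i j * pvE m j i = 0 := by
  unfold pvE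
  by_cases h1 : (m >>> i) &&& 1 = 1 <;> by_cases h2 : (m >>> j) &&& 1 = 1 <;>
    simp [h1, h2] <;> omega

lemma pv_keyStep (P : List Nat) (m : Nat) :
    pvS (P ++ [m]) = pvS P
      + 2 * ∑ i ∈ Finset.range 26, ∑ j ∈ Finset.range 26,
              (pvE m i j : Int) * (pvPC P j i : Int) := by
  unfold pvS
  have hterm : ∀ i j : Nat,
      (pvPC (P ++ [m]) i j : Int) * (pvPC (P ++ [m]) j i : Int)
        = (pvPC P i j : Int) * (pvPC P j i : Int)
          + ((pvE m i j : Int) * (pvPC P j i : Int) + (pvPC P i j : Int) * (pvE m j i : Int)) := by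
    intro i j
    rw [pvPC_append, pvPC_append]
    have h0 : (pvE m i j : Int) * (pvE m j i : Int) = 0 := by
      exact_mod_cast congrArg (fun n : Nat => (n : Int)) (pvE_mul_swap m i j)
    push_cast
    linear_combination h0
  simp only [hterm, Finset.sum_add_distrib]
  have hswap : ∑ i ∈ Finset.range 26, ∑ j ∈ Finset.range 26, (pvPC P i j : Int) * (pvE m j i : Int)
      = ∑ i ∈ Finset.range 26, ∑ j ∈ Finset.range 26, (pvE m i j : Int) * (pvPC P j i : Int) := by
    rw [Finset.sum_comm]
    apply Finset.sum_congr rfl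
    intro i _
    apply Finset.sum_congr rfl
    intro j _
    ring
  rw [hswap]
  ring

lemma pv_delta (P : List Nat) (m : Nat) :
    ∑ i ∈ Finset.range 26, (if (m >>> i) &&& 1 = 1 then pvRow m (pvCnt P) i else 0)
      = ∑ i ∈ Finset.range 26, ∑ j ∈ Finset.range 26,
          (pvE m i j : Int) * (pvPC P j i : Int) := by
  apply Finset.sum_congr rfl
  intro i _
  by_cases hbi : (m >>> i) &&& 1 = 1
  · rw [if_pos hbi]
    unfold pvRow
    apply Finset.sum_congr rfl
    intro j _
    rw [pvCnt_eq_pc]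
    unfold pvE
    by_cases hbj : (m >>> j) &&& 1 = 0
    · have hc : (((m >>> i) &&& 1 == 1) && ((m >>> j) &&& 1 == 0) : Bool) = true := by
        simp [hbi, hbj]
      rw [if_pos hbj, if_pos hc]
      ring
    · have hc : (((m >>> i) &&& 1 == 1) && ((m >>> j) &&& 1 == 0) : Bool) = false := by
        simp [Nat.and_one_is_mod]
        intro _
        have := Nat.and_one_is_mod (m >>> j)
        omega
      rw [if_neg hbj, if_neg (by rw [hc]; simp)]
      simp
  · rw [if_neg hbi]
    symm
    apply Finset.sum_eq_zero
    intro j _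
    unfold pvE
    have hc : (((m >>> i) &&& 1 == 1) && ((m >>> j) &&& 1 == 0) : Bool) = false := by
      simp [Nat.and_one_is_mod]
      intro h
      exact absurd h (by have := Nat.and_one_is_mod (m >>> i); omega)
    rw [if_neg (by rw [hc]; simp)]
    simp

lemma pvE_swap_ite (m a b : Nat) :
    pvE m b a = (if (m >>> a) &&& 1 = 0 ∧ (m >>> b) &&& 1 = 1 then 1 else 0) := by
  unfold pvE
  simp only [Nat.and_one_is_mod]
  by_cases h1 : m >>> b % 2 = 1 <;> by_cases h2 : m >>> a % 2 = 0 <;>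
    simp [h1, h2]

lemma pv_afold :
    ∀ (M P : List Nat) (ans : Int) (cnt : Nat → Nat → Nat),
      (∀ a b, a < 26 → b < 26 → cnt a b = pvCnt P a b) →
      (M.foldl (fun st mask => (List.range 26).foldl (pvStepA mask) st) (ans, cnt)).1 * 2
        = ans * 2 + pvS (P ++ M) - pvS P := by
  intro M
  induction M with
  | nil =>
    intro P ans cnt _
    simp
  | cons m M ihM =>
    intro P ans cnt hcnt
    simp only [List.foldl_cons]
    obtain ⟨h1, h2⟩ := pv_ifold m (List.range 26) List.nodup_range ans cnt
    have hcnt' : ∀ a b, a < 26 → b < 26 →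
        ((List.range 26).foldl (pvStepA m) (ans, cnt)).2 a b = pvCnt (P ++ [m]) a b := by
      intro a b ha hb
      rw [h2 a b, hcnt a b ha hb, pvCnt_eq_pc (P ++ [m]) a b, pvPC_append, ← pvCnt_eq_pc,
          pvE_swap_ite]
      congr 1
      simp [List.mem_range, ha, hb]
    have hmain := ihM (P ++ [m]) ((List.range 26).foldl (pvStepA m) (ans, cnt)).1
      ((List.range 26).foldl (pvStepA m) (ans, cnt)).2 hcnt'
    have hrowcg : (List.range 26).map (fun i => if (m >>> i) &&& 1 = 1 then pvRow m cnt i else 0)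
        = (List.range 26).map (fun i => if (m >>> i) &&& 1 = 1 then pvRow m (pvCnt P) i else 0) := by
      apply List.map_congr_left
      intro x hx
      by_cases hbx : (m >>> x) &&& 1 = 1
      · rw [if_pos hbx, if_pos hbx]
        unfold pvRow
        apply Finset.sum_congr rfl
        intro j hj
        rw [hcnt x j (List.mem_range.mp hx) (Finset.mem_range.mp hj)]
      · rw [if_neg hbx, if_neg hbx]
    have hfst : ((List.range 26).foldl (pvStepA m) (ans, cnt)).1
        = ans + ∑ i ∈ Finset.range 26, (if (m >>> i) &&& 1 = 1 then pvRow m (pvCnt P) i else 0) := by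
      rw [h1, hrowcg, pv_sum_map_range]
    rw [Prod.mk.eta] at hmain
    rw [hmain, hfst, pv_delta, pv_keyStep P m]
    have hassoc : P ++ [m] ++ M = P ++ m :: M := by simp
    rw [hassoc]
    ring

lemma pvS_nil : pvS [] = 0 := by
  simp [pvS, pvPC]

lemma pv_bcount (M : List Nat) : pvBCount M = pvS M := by
  unfold pvBCount pvS
  have hin : ∀ (a : Int) (i : Nat),
      (List.range 26).foldl (fun ans j =>
        ans + (((M.filter (fun m => ((m >>> i) &&& 1 == 1) && ((m >>> j) &&& 1 == 0))).length : Int))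
            * (((M.filter (fun m => ((m >>> j) &&& 1 == 1) && ((m >>> i) &&& 1 == 0))).length : Int))) a
      = a + ∑ j ∈ Finset.range 26, (pvPC M i j : Int) * (pvPC M j i : Int) := by
    intro a i
    rw [PySem.List.foldl_add, pv_sum_map_range]
    rfl
  refine Eq.trans (PySem.List.foldl_congr_mem (l := List.range 26) (init := 0)
      (f := fun (ans : Int) (i : Nat) =>
        (List.range 26).foldl (fun ans j =>
          ans + (((M.filter (fun m => ((m >>> i) &&& 1 == 1) && ((m >>> j) &&& 1 == 0))).length : Int))
              * (((M.filter (fun m => ((m >>> j) &&& 1 == 1) && ((m >>> i) &&& 1 == 0))).length : Int))) ans)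
      (g := fun (ans : Int) (i : Nat) =>
      ans + ∑ j ∈ Finset.range 26, (pvPC M i j : Int) * (pvPC M j i : Int))
      (fun acc x _ => hin acc x)) ?_
  rw [PySem.List.foldl_add, pv_sum_map_range]
  simp

lemma pv_main (M : List Nat) : pvACount M = pvBCount M := by
  have h := pv_afold M [] 0 (fun _ _ => (0 : Nat)) (by intro a b _ _; simp [pvCnt])
  unfold pvACount
  rw [pv_bcount, h, pvS_nil]
  simp

-- ===== VERDICT (by name: the statement is the Claim_ definition above) =====
theorem distinctNames_spec : Claim_equal_distinctNames := by
  intro ideas _ _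
  unfold Spec_distinctNames distinctNames distinctNames_alt
  have hg : pvGroupA ideas = pvGroupB ideas := rfl
  rw [hg, pv_main]
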